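-- pv_equiv track=rewrite | github.com/Pawelkwc/Ai_analizer | functions_ai_konverter.py | check_parantices_f
-- ===== SOURCE A (Python) =====
-- def check_parantices_f(structure):
--         count = 0
--         num_of_branches = 0
--         lv_of_branches = 0
--         for index, atom in enumerate(structure):
--
--
--             if atom == "(" and count != 0:
--                     count +=1
--             if atom == ")" and count != 0:
--                     count -=1
--
--             if atom == "(" and count == 0:
--                 num_of_branches+=1
--                 count+=1
--                 if index+1 < len(structure) and structure[index+1] in ["="]:
--                     lv_of_branches+=1
--                 if index+1 < len(structure) and structure[index+1] in ["#"]: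
--                     lv_of_branches+=2
--
--
--             # if atom == ")" and count == 0:
--
--             #     num_of_branches+=1
--             #     count-=1
--             #     if index+1 < len(structure) and structure[index+1] in ["="]:
--             #         lv_of_branches+=1
--             #     if index+1 < len(structure) and structure[index+1] in ["#"]:
--             #         lv_of_branches+=2
--
--
--
--
--
--         return num_of_branches, lv_of_branches
-- ===== SOURCE B (Python) =====
-- def _skip(s, i):
--     # consume forward from i to just past the ')' matching the already-consumed '(';
--     # nested groups are consumed by a recursive call
--     while i < len(s):
--         c = s[i]
--         if c == ")":
--             return i + 1
--         if c == "(":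
--             i = _skip(s, i + 1)
--         else:
--             i += 1
--     return i
--
--
-- def check_parantices_f(structure):
--     # recursive descent: walk only the top level; each '(' starts a branch, is scored
--     # by its following character, and its whole group is skipped recursively
--     nb = 0
--     lv = 0
--     i = 0
--     n = len(structure)
--     while i < n:
--         if structure[i] == "(":
--             nb += 1
--             if i + 1 < n:
--                 nxt = structure[i + 1]
--                 if nxt == "=":
--                     lv += 1
--                 elif nxt == "#":
--                     lv += 2
--             i = _skip(structure, i + 1)
--         else:
--             i += 1
--     return nb, lv
-- ===== Notes on version B (the rewrite author's own statement) =====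
-- stated objective: alternative
-- what changed: Replaces A's fused single pass with a depth counter by recursive descent: an outer loop walks only the top level, scores each top-level opening parenthesis by the character after it, and delegates the whole nested group to a recursive skip-to-matching-parenthesis subroutine (no depth counter in the main scan).
import Mathlib
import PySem

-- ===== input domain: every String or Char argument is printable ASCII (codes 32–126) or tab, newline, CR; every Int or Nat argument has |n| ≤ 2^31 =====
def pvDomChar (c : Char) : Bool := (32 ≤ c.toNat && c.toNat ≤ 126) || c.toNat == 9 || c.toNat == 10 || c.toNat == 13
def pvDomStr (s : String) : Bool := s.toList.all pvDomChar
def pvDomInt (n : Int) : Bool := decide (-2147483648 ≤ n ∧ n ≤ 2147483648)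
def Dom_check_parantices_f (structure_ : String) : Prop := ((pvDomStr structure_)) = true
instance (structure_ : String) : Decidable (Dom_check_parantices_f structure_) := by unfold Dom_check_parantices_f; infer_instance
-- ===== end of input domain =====

-- B replaces A's fused depth-counter pass by recursive descent (a top-level walk plus a
-- recursive skip of each nested group); same O(n) cost, different algorithmic structure.
-- ===== PORT A =====
def aLoop (ls : List Char) : List Char → Nat → Int → Int → Int → Int × Int
  | [], _, _, nb, lv => (nb, lv)
  | atom :: rest, index, count, nb, lv =>
    let count := if atom = '(' ∧ count ≠ 0 then count + 1 else count
    let count := if atom = ')' ∧ count ≠ 0 then count - 1 else count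
    if atom = '(' ∧ count = 0 then
      let nb := nb + 1
      let count := count + 1
      let lv := if index + 1 < ls.length ∧ ls[index + 1]? = some '=' then lv + 1 else lv
      let lv := if index + 1 < ls.length ∧ ls[index + 1]? = some '#' then lv + 2 else lv
      aLoop ls rest (index + 1) count nb lv
    else
      aLoop ls rest (index + 1) count nb lv

def check_parantices_f (structure_ : String) : Int × Int :=
  aLoop structure_.toList structure_.toList 0 0 0 0

-- ===== PORT B =====
-- _skip of Source B: consume up to and including the ')' matching the already-consumed '(';
-- the Lean port works on the remaining suffix instead of an index, and bundles the
-- "result is no longer than the input" fact needed for termination of the nested call.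
def bSkip : (l : List Char) → {r : List Char // r.length ≤ l.length}
  | [] => ⟨[], le_rfl⟩
  | c :: r =>
    if c = ')' then ⟨r, by simp⟩
    else if c = '(' then
      let s1 := bSkip r
      let s2 := bSkip s1.1
      ⟨s2.1, by have h1 := s1.2; have h2 := s2.2; simp; omega⟩
    else
      let s1 := bSkip r
      ⟨s1.1, by have h1 := s1.2; simp; omega⟩
  termination_by l => l.length
  decreasing_by
  all_goals first
    | (have h1 := s1.2; simp; omega)
    | simp

-- top-level walk of Source B (index i ↦ remaining suffix; structure[i+1] ↦ head of the rest)
def bTop : (l : List Char) → Int → Int → Int × Int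
  | [], nb, lv => (nb, lv)
  | c :: r, nb, lv =>
    if c = '(' then
      let bonus : Int :=
        match r[0]? with
        | none => 0
        | some nxt => if nxt = '=' then 1 else if nxt = '#' then 2 else 0
      bTop (bSkip r).1 (nb + 1) (lv + bonus)
    else
      bTop r nb lv
  termination_by l => l.length
  decreasing_by
  · have h1 := (bSkip r).2; simp; omega
  · simp

def check_parantices_f_alt (structure_ : String) : Int × Int :=
  bTop structure_.toList 0 0

-- ===== PRECONDITION & SPEC =====
def Spec_check_parantices_f (structure_ : String) (out : Int × Int) : Prop := out = check_parantices_f_alt structure_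
instance (structure_ : String) (out : Int × Int) : Decidable (Spec_check_parantices_f structure_ out) := by unfold Spec_check_parantices_f; infer_instance

-- ===== CLAIM (what is proved, stated in full; the proofs are below) =====
def Claim_equal_check_parantices_f : Prop := ∀ (structure_ : String), Dom_check_parantices_f structure_ → Spec_check_parantices_f structure_ (check_parantices_f structure_)

-- ===== LEMMAS AND PROOFS =====

-- index-free restatement of A's loop: the bonus character is the head of the rest
def aLoop2 : List Char → Int → Int → Int → Int × Int
  | [], _, nb, lv => (nb, lv)
  | atom :: rest, count, nb, lv =>
    let count := if atom = '(' ∧ count ≠ 0 then count + 1 else count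
    let count := if atom = ')' ∧ count ≠ 0 then count - 1 else count
    if atom = '(' ∧ count = 0 then
      let lv := if rest[0]? = some '=' then lv + 1 else lv
      let lv := if rest[0]? = some '#' then lv + 2 else lv
      aLoop2 rest (count + 1) (nb + 1) lv
    else
      aLoop2 rest count nb lv

lemma aLoop_eq_aLoop2 (ls : List Char) :
    ∀ (l : List Char) (i : Nat) (c nb lv : Int), ls.drop i = l →
      aLoop ls l i c nb lv = aLoop2 l c nb lv := by
  intro l
  induction l with
  | nil => intro i c nb lv _; simp [aLoop, aLoop2]
  | cons atom rest ih =>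
    intro i c nb lv hdrop
    have hrest : ls.drop (i + 1) = rest := by
      rw [← List.drop_drop, hdrop]
      simp
    have hget : ∀ x : Char, (i + 1 < ls.length ∧ ls[i + 1]? = some x) ↔ rest[0]? = some x := by
      intro x
      have h0 : ls[i + 1]? = rest[0]? := by
        rw [← hrest, List.getElem?_drop]
      constructor
      · rintro ⟨_, h⟩; rw [← h0]; exact h
      · intro h
        have h' : ls[i + 1]? = some x := by rw [h0]; exact h
        exact ⟨(List.getElem?_eq_some_iff.mp h').1, h'⟩
    simp only [aLoop, aLoop2, hget]
    split_ifs <;> exact ih _ _ _ _ hrest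

lemma aLoop2_skip : ∀ (n : Nat) (l : List Char), l.length ≤ n →
    ∀ (c nb lv : Int), 1 ≤ c →
      aLoop2 l c nb lv = aLoop2 (bSkip l).1 (c - 1) nb lv := by
  intro n
  induction n with
  | zero =>
    intro l hl c nb lv _
    have : l = [] := List.eq_nil_of_length_eq_zero (Nat.le_zero.mp hl)
    subst this
    simp [aLoop2, bSkip]
  | succ n ih =>
    intro l hl c nb lv hc
    match l with
    | [] => simp [aLoop2, bSkip]
    | atom :: rest =>
      have hr : rest.length ≤ n := by simpa using hl
      by_cases hop : atom = '('
      · subst hop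
        have hne : ¬ (c + 1 = 0) := by omega
        simp only [aLoop2, bSkip]
        have hcne : c ≠ 0 := by omega
        simp only [hcne, ne_eq, not_false_eq_true, and_true, if_true]
        simp only [show ¬('(' = ')') by decide, false_and, if_false, hne, if_false]
        rw [ih rest hr (c + 1) nb lv (by omega)]
        have h2 : (bSkip rest).1.length ≤ n := le_trans (bSkip rest).2 hr
        rw [ih (bSkip rest).1 h2 (c + 1 - 1) nb lv (by omega)]
        norm_num
      · by_cases hcl : atom = ')'
        · subst hcl
          have hcne : c ≠ 0 := by omega
          simp only [aLoop2, bSkip]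
          simp only [show ¬(')' = '(') by decide, false_and, if_false, hcne, ne_eq,
            not_false_eq_true, and_true, if_true]
        · simp only [aLoop2, bSkip, hop, hcl, false_and, if_false]
          exact ih rest hr c nb lv hc

lemma aLoop2_eq_bTop : ∀ (n : Nat) (l : List Char), l.length ≤ n →
    ∀ (nb lv : Int), aLoop2 l 0 nb lv = bTop l nb lv := by
  intro n
  induction n with
  | zero =>
    intro l hl nb lv
    have : l = [] := List.eq_nil_of_length_eq_zero (Nat.le_zero.mp hl)
    subst this
    simp [aLoop2, bTop]
  | succ n ih =>
    intro l hl nb lv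
    match l with
    | [] => simp [aLoop2, bTop]
    | atom :: rest =>
      have hr : rest.length ≤ n := by simpa using hl
      by_cases hop : atom = '('
      · subst hop
        simp only [aLoop2, bTop]
        simp only [ne_eq, not_true_eq_false, and_false, if_false,
          show ¬('(' = ')') by decide, and_true]
        norm_num
        rw [aLoop2_skip rest.length rest le_rfl 1 (nb + 1) _ le_rfl]
        norm_num
        have h2 : (bSkip rest).1.length ≤ n := le_trans (bSkip rest).2 hr
        rw [ih (bSkip rest).1 h2]
        congr 1
        rcases h : rest[0]? with _ | x
        · simp
        · by_cases he : x = '='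
          · subst he; simp
          · by_cases hh : x = '#'
            · subst hh; simp
            · simp [he, hh]
      · simp only [aLoop2, bTop, hop, false_and, if_false]
        rw [if_neg (by simp)]
        exact ih rest hr nb lv

-- ===== VERDICT (by name: the statement is the Claim_ definition above) =====
theorem check_parantices_f_spec : Claim_equal_check_parantices_f := by
  intro s _
  unfold Spec_check_parantices_f check_parantices_f check_parantices_f_alt
  rw [aLoop_eq_aLoop2 s.toList s.toList 0 0 0 0 (by simp)]
  exact aLoop2_eq_bTop s.toList.length s.toList le_rfl 0 0
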